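-- pv_equiv track=rewrite | github.com/ermis21/multi-agent | app/dream/counterfactual.py | compute_fidelity
-- ===== SOURCE A (Python) =====
-- from enum import Enum
-- from typing import Iterable
--
-- class Band(str, Enum):
--     IDENTICAL = "identical"
--     MINOR = "minor_variation"
--     SUBSTANTIAL = "substantial"
--     DIVERGENT = "divergent"
--     UNRELATED = "unrelated"
--
-- _BAND_ORDER = {
--     Band.IDENTICAL: 0,
--     Band.MINOR: 1,
--     Band.SUBSTANTIAL: 2,
--     Band.DIVERGENT: 3,
--     Band.UNRELATED: 4,
-- }
--
-- def compute_fidelity(per_turn: Iterable[dict], cf_aborts: int) -> str: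
--     """Aggregate per-turn band records into a three-level fidelity verdict.
--
--     Rules:
--       - cf_aborts >= 2  → low (user-sim is failing to produce turns)
--       - no divergent/unrelated turns AND no substantial turns → high
--       - max band == substantial                              → moderate
--       - max band in {divergent, unrelated}                   → low
--     """
--     if cf_aborts >= 2:
--         return "low"
--     turns = list(per_turn)
--     if not turns:
--         return "high"
--     max_ord = -1
--     for t in turns:
--         try:
--             b = Band(t["band"])
--         except (KeyError, ValueError):
--             continue
--         max_ord = max(max_ord, _BAND_ORDER[b])
--     if max_ord <= _BAND_ORDER[Band.MINOR]:
--         return "high"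
--     if max_ord <= _BAND_ORDER[Band.SUBSTANTIAL]:
--         return "moderate"
--     return "low"
-- ===== SOURCE B (Python) =====
-- _VALID = ("identical", "minor_variation", "substantial", "divergent", "unrelated")
--
-- def compute_fidelity(per_turn, cf_aborts):
--     if cf_aborts >= 2:
--         return "low"
--     turns = list(per_turn)
--     if not turns:
--         return "high"
--     bands = [t["band"] for t in turns if "band" in t and t["band"] in _VALID]
--     if any(b in ("divergent", "unrelated") for b in bands):
--         return "low"
--     if any(b == "substantial" for b in bands):
--         return "moderate"
--     return "high"
-- ===== Notes on version B (the rewrite author's own statement) =====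
-- stated objective: idiomatic
-- what changed: Replaces the running max-ordinal accumulator and threshold ladder with collecting the valid band strings once and severity-first any()-predicate early returns (no Enum/ordinal table at all).
import Mathlib
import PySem

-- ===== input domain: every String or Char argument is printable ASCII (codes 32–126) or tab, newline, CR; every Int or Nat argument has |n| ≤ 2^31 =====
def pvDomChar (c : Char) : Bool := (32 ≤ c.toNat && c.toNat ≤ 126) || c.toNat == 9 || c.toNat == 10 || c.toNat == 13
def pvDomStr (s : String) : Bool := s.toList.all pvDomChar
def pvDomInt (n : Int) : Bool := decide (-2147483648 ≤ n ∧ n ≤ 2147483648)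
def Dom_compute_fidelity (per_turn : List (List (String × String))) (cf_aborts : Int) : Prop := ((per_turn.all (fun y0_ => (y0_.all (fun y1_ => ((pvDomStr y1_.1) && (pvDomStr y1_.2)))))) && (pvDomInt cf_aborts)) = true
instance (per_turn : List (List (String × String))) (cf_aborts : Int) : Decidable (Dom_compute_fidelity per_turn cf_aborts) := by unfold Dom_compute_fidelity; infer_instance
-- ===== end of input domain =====

-- B replaces A's running max-ordinal accumulator and threshold ladder with one pass collecting
-- the valid band strings and severity-first any() early returns (idiomatic; same return value).

-- ===== PORT A =====
-- Band(x) succeeds exactly on the five enum values; _BAND_ORDER gives the ordinal.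
def bandOrd? (s : String) : Option Int :=
  if s = "identical" then some 0
  else if s = "minor_variation" then some 1
  else if s = "substantial" then some 2
  else if s = "divergent" then some 3
  else if s = "unrelated" then some 4
  else none

-- the for-loop: t["band"] (first match = dict lookup), skip on KeyError/ValueError, else max
def fidLoop : List (List (String × String)) → Int → Int
  | [], m => m
  | t :: ts, m =>
    match List.lookup "band" t with
    | none => fidLoop ts m
    | some v =>
      match bandOrd? v with
      | none => fidLoop ts m
      | some o => fidLoop ts (max m o)

def compute_fidelity (per_turn : List (List (String × String))) (cf_aborts : Int) : String :=
  if cf_aborts ≥ 2 then "low"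
  else if per_turn.isEmpty then "high"
  else
    let max_ord := fidLoop per_turn (-1)
    if max_ord ≤ 1 then "high"
    else if max_ord ≤ 2 then "moderate"
    else "low"

-- ===== PORT B =====
def isValidBand (s : String) : Bool :=
  s == "identical" || s == "minor_variation" || s == "substantial" || s == "divergent" || s == "unrelated"

-- the comprehension: [t["band"] for t in turns if "band" in t and t["band"] in _VALID]
def validBands (per_turn : List (List (String × String))) : List String :=
  per_turn.filterMap (fun t =>
    match List.lookup "band" t with
    | none => none
    | some v => if isValidBand v then some v else none)

def compute_fidelity_alt (per_turn : List (List (String × String))) (cf_aborts : Int) : String :=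
  if cf_aborts ≥ 2 then "low"
  else if per_turn.isEmpty then "high"
  else
    let bands := validBands per_turn
    if bands.any (fun b => b == "divergent" || b == "unrelated") then "low"
    else if bands.any (fun b => b == "substantial") then "moderate"
    else "high"

-- ===== PRECONDITION & SPEC =====
def Spec_compute_fidelity (per_turn : List (List (String × String))) (cf_aborts : Int) (out : String) : Prop := out = compute_fidelity_alt per_turn cf_aborts
instance (per_turn : List (List (String × String))) (cf_aborts : Int) (out : String) : Decidable (Spec_compute_fidelity per_turn cf_aborts out) := by unfold Spec_compute_fidelity; infer_instance

-- ===== CLAIM (what is proved, stated in full; the proofs are below) =====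
def Claim_equal_compute_fidelity : Prop := ∀ (per_turn : List (List (String × String))) (cf_aborts : Int), Dom_compute_fidelity per_turn cf_aborts → Spec_compute_fidelity per_turn cf_aborts (compute_fidelity per_turn cf_aborts)

-- ===== LEMMAS AND PROOFS =====

def ordD (s : String) : Int := (bandOrd? s).getD 0

lemma bandOrd?_isSome (s : String) : (bandOrd? s).isSome = isValidBand s := by
  unfold bandOrd? isValidBand
  split_ifs with h1 h2 h3 h4 h5 <;> simp_all

-- A's loop equals a fold of max∘ordD over B's collected valid bands
lemma fidLoop_eq (pt : List (List (String × String))) :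
    ∀ m, fidLoop pt m = (validBands pt).foldl (fun a v => max a (ordD v)) m := by
  induction pt with
  | nil => intro m; simp [fidLoop, validBands]
  | cons t ts ih =>
    intro m
    simp only [fidLoop, validBands, List.filterMap_cons]
    cases hl : List.lookup "band" t with
    | none => simpa [validBands] using ih m
    | some v =>
      cases ho : bandOrd? v with
      | none =>
        have hv : isValidBand v = false := by
          have := bandOrd?_isSome v; rw [ho] at this; simpa using this.symm
        simp [ho, hv, ih, validBands]
      | some o =>
        have hv : isValidBand v = true := by
          have := bandOrd?_isSome v; rw [ho] at this; simpa using this.symm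
        simp [ho, hv, ordD, ih, validBands]

lemma mem_validBands_valid {pt : List (List (String × String))} {b : String}
    (h : b ∈ validBands pt) : isValidBand b = true := by
  unfold validBands at h
  rw [List.mem_filterMap] at h
  obtain ⟨t, -, ht⟩ := h
  cases hl : List.lookup "band" t with
  | none => simp [hl] at ht
  | some v =>
    simp only [hl] at ht
    by_cases hv : isValidBand v = true
    · simp [hv] at ht; subst ht; exact hv
    · simp [hv] at ht

lemma valid_cases {b : String} (h : isValidBand b = true) :
    b = "identical" ∨ b = "minor_variation" ∨ b = "substantial" ∨ b = "divergent" ∨ b = "unrelated" := by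
  unfold isValidBand at h
  simp only [Bool.or_eq_true, beq_iff_eq] at h
  tauto

lemma foldl_max_ge (f : String → Int) (k : Int) :
    ∀ (l : List String) (m : Int),
      (k ≤ l.foldl (fun a v => max a (f v)) m ↔ k ≤ m ∨ ∃ b ∈ l, k ≤ f b) := by
  intro l
  induction l with
  | nil => intro m; simp
  | cons x xs ih =>
    intro m
    rw [List.foldl_cons, ih, le_max_iff]
    constructor
    · rintro ((h | h) | ⟨b, hb, hk⟩)
      · exact Or.inl h
      · exact Or.inr ⟨x, List.mem_cons_self, h⟩
      · exact Or.inr ⟨b, List.mem_cons_of_mem _ hb, hk⟩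
    · rintro (h | ⟨b, hb, hk⟩)
      · exact Or.inl (Or.inl h)
      · rcases List.mem_cons.mp hb with h' | h'
        · rw [h'] at hk; exact Or.inl (Or.inr hk)
        · exact Or.inr ⟨b, h', hk⟩

theorem compute_fidelity_spec : Claim_equal_compute_fidelity := by
  unfold Claim_equal_compute_fidelity
  intro pt ca _
  unfold Spec_compute_fidelity compute_fidelity compute_fidelity_alt
  by_cases hca : ca ≥ 2
  · simp [hca]
  · simp only [hca, if_false]
    by_cases hpt : pt.isEmpty
    · simp [hpt]
    · simp only [hpt, Bool.false_eq_true, if_false]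
      rw [fidLoop_eq]
      set bands := validBands pt with hbands
      set M := bands.foldl (fun a v => max a (ordD v)) (-1) with hM
      have hvalid : ∀ b ∈ bands, isValidBand b = true := fun b hb => mem_validBands_valid hb
      by_cases hsev : bands.any (fun b => b == "divergent" || b == "unrelated") = true
      · -- some severe band ⇒ M ≥ 3
        rw [List.any_eq_true] at hsev
        obtain ⟨b, hb, hbv⟩ := hsev
        have h3 : (3:Int) ≤ ordD b := by
          rcases (by simpa using hbv : b = "divergent" ∨ b = "unrelated") with rfl | rfl <;> decide
        have hM3 : (3:Int) ≤ M := by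
          rw [hM, foldl_max_ge]; exact Or.inr ⟨b, hb, h3⟩
        have h1 : ¬ (M ≤ 1) := by omega
        have h2 : ¬ (M ≤ 2) := by omega
        have hs : bands.any (fun b => b == "divergent" || b == "unrelated") = true :=
          List.any_eq_true.mpr ⟨b, hb, hbv⟩
        simp [h1, h2, hs]
      · -- no severe band ⇒ every ordD ≤ 2 ⇒ M ≤ 2
        have hnosev : ∀ b ∈ bands, ¬(b = "divergent" ∨ b = "unrelated") := by
          intro b hb hc
          exact hsev (List.any_eq_true.mpr ⟨b, hb, by rcases hc with rfl | rfl <;> simp⟩)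
        have hub : ∀ b ∈ bands, ordD b ≤ 2 := by
          intro b hb
          rcases valid_cases (hvalid b hb) with rfl | rfl | rfl | rfl | rfl
          · decide
          · decide
          · decide
          · exact absurd (Or.inl rfl) (hnosev _ hb)
          · exact absurd (Or.inr rfl) (hnosev _ hb)
        have hM2 : M ≤ 2 := by
          rw [hM]
          by_contra h
          rw [not_le] at h
          rcases (foldl_max_ge ordD 3 bands (-1)).mp (by omega) with h' | ⟨b, hb, hk⟩
          · omega
          · have := hub b hb; omega
        by_cases hsub : bands.any (fun b => b == "substantial") = true
        · -- substantial present ⇒ M ≥ 2 ⇒ moderate on both sides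
          rw [List.any_eq_true] at hsub
          obtain ⟨b, hb, hbv⟩ := hsub
          have hbeq : b = "substantial" := by simpa using hbv
          have hM2' : (2:Int) ≤ M := by
            rw [hM, foldl_max_ge]
            exact Or.inr ⟨b, hb, by subst hbeq; decide⟩
          have h1 : ¬ (M ≤ 1) := by omega
          have hs : bands.any (fun b => b == "substantial") = true :=
            List.any_eq_true.mpr ⟨b, hb, hbv⟩
          simp [h1, hM2, hsev, hs]
        · -- nothing ≥ 2 ⇒ M ≤ 1 ⇒ high on both sides
          have hub1 : ∀ b ∈ bands, ordD b ≤ 1 := by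
            intro b hb
            rcases valid_cases (hvalid b hb) with rfl | rfl | rfl | rfl | rfl
            · decide
            · decide
            · exact absurd (List.any_eq_true.mpr ⟨_, hb, by simp⟩) hsub
            · exact absurd (Or.inl rfl) (hnosev _ hb)
            · exact absurd (Or.inr rfl) (hnosev _ hb)
          have hM1 : M ≤ 1 := by
            rw [hM]
            by_contra h
            rw [not_le] at h
            rcases (foldl_max_ge ordD 2 bands (-1)).mp (by omega) with h' | ⟨b, hb, hk⟩
            · omega
            · have := hub1 b hb; omega
          simp [hM1, hsev, hsub]

-- ===== VERDICT (by name: the statement is the Claim_ definition above) =====
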